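-- pv_equiv track=rewrite | github.com/sfc-gh-jiyan/MacWhisper | text_utils.py | find_after_overlap
-- ===== SOURCE A (Python) =====
-- OVERLAP_STRIP_CHARS = set(' \t\n，。！？、,.!?-\u3000')
--
-- def find_after_overlap(committed: str, raw: str, min_match: int = 6) -> str:
--     """Find genuinely new content in *raw* that comes after *committed*.
--
--     Uses aggressive normalization so Whisper's per-cycle wording variations
--     don't break the overlap search.
--     """
--     if not committed or not raw:
--         return raw
--
--     norm_raw_chars = []
--     raw_positions = []
--     for i, ch in enumerate(raw):
--         if ch not in OVERLAP_STRIP_CHARS: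
--             norm_raw_chars.append(ch.lower())
--             raw_positions.append(i)
--     norm_raw = ''.join(norm_raw_chars)
--
--     norm_committed = ''.join(
--         ch.lower() for ch in committed if ch not in OVERLAP_STRIP_CHARS
--     )
--
--     max_search = min(60, len(norm_committed))
--     for tail_len in range(max_search, min_match - 1, -1):
--         tail = norm_committed[-tail_len:]
--         idx = norm_raw.find(tail)
--         if idx >= 0:
--             norm_end = idx + tail_len
--             if norm_end >= len(raw_positions):
--                 return ""
--             raw_end = raw_positions[norm_end]
--             result = raw[raw_end:].lstrip(' ,，.。!！?？、')
--             return result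
--     return raw
-- ===== SOURCE B (Python) =====
-- OVERLAP_STRIP_CHARS = set(' \t\n，。！？、,.!?-\u3000')
--
-- def find_after_overlap(committed: str, raw: str, min_match: int = 6) -> str:
--     """Binary-search the largest matching normalized suffix instead of
--     scanning every length top-down (matching is monotone in the length)."""
--     if not committed or not raw:
--         return raw
--
--     pairs = [(i, ch.lower()) for i, ch in enumerate(raw)
--              if ch not in OVERLAP_STRIP_CHARS]
--     raw_positions = [i for i, _ in pairs]
--     norm_raw = ''.join(ch for _, ch in pairs)
--
--     norm_committed = ''.join(
--         ch.lower() for ch in committed if ch not in OVERLAP_STRIP_CHARS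
--     )
--
--     lo, hi = min_match, min(60, len(norm_committed))
--     best = -1
--     while lo <= hi:
--         mid = (lo + hi) // 2
--         if norm_committed[-mid:] in norm_raw:
--             best = mid
--             lo = mid + 1
--         else:
--             hi = mid - 1
--     if best < 0:
--         return raw
--
--     idx = norm_raw.find(norm_committed[-best:])
--     norm_end = idx + best
--     if norm_end >= len(raw_positions):
--         return ""
--     raw_end = raw_positions[norm_end]
--     return raw[raw_end:].lstrip(' ,，.。!！?？、')
-- ===== Notes on version B (the rewrite author's own statement) =====
-- stated objective: alternative
-- what changed: Instead of scanning every tail length top-down with a substring search at each length, B binary-searches over the tail length (matching a longer normalized suffix implies matching every shorter one, so the match predicate is monotone) and recomputes the match position once for the best length.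
-- outside the precondition, e.g. on find_after_overlap('ab', 'xyz', -2): A returns 'yz', B returns 'xyz'
import Mathlib
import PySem

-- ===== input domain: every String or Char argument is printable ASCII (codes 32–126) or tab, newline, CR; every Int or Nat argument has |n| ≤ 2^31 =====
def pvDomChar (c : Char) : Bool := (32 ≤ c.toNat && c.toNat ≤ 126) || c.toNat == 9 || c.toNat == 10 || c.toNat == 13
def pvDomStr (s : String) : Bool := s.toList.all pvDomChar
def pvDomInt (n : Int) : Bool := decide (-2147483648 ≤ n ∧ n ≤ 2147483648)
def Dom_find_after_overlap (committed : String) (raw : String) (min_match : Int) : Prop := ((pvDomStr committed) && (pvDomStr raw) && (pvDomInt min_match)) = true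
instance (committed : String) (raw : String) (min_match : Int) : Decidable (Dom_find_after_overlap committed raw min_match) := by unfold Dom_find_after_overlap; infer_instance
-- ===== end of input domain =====

-- B replaces A's top-down scan over tail lengths by a binary search over the
-- tail length (the suffix-match predicate is monotone in the length): an
-- alternative algorithm of the same observable behaviour for min_match ≥ 1.


-- ===== PORT A =====
-- OVERLAP_STRIP_CHARS (a set used only for membership on single chars)
def fao_stripSet : List Char := [' ', '\t', '\n', '，', '。', '！', '？', '、', ',', '.', '!', '?', '-', '\u3000']
-- the chars of the lstrip argument ' ,，.。!！?？、'
def fao_lstripSet : List Char := [' ', ',', '，', '.', '。', '!', '！', '?', '？', '、']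
-- hand port of str.lstrip(chars) (PySem has no lstrip-with-chars): drop leading
-- characters that are in the set — exact Python semantics.
def fao_lstrip (s : String) : String :=
  String.ofList (s.toList.dropWhile (fun c => fao_lstripSet.contains c))

-- A's search loop: for tail_len in range(max_search, min_match-1, -1)
def fao_loopA (normC normR : List Char) (rawPos : List Int) (raw : String) : List Int → String
  | [] => raw
  | t :: rest =>
      let tail := PySem.List.slice normC (some (-t)) none      -- norm_committed[-tail_len:]
      let idx := PySem.Chars.find normR tail                   -- norm_raw.find(tail)
      if 0 ≤ idx then
        let normEnd := idx + t
        if (rawPos.length : Int) ≤ normEnd then ""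
        else
          -- raw_positions[norm_end]; in-range here whenever Python does not raise
          fao_lstrip (PySem.Str.slice raw (some (PySem.List.pyGetD rawPos normEnd 0)) none)
      else fao_loopA normC normR rawPos raw rest

def find_after_overlap (committed : String) (raw : String) (min_match : Int) : String :=
  if committed = "" ∨ raw = "" then raw
  else
    let st := (PySem.List.enumerate raw.toList).foldl
      (fun (acc : List Char × List Int) p =>
        if fao_stripSet.contains p.2 then acc
        else (acc.1 ++ [PySem.Chars.lowerChar p.2], acc.2 ++ [p.1]))
      ([], [])
    let normRaw := st.1
    let rawPositions := st.2
    let normCommitted := (committed.toList.filter (fun c => !fao_stripSet.contains c)).map PySem.Chars.lowerChar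
    let maxSearch := min 60 (normCommitted.length : Int)
    fao_loopA normCommitted normRaw rawPositions raw (PySem.List.pyRange maxSearch (min_match - 1) (-1))

-- ===== PORT B =====
-- binary search over the tail length: largest l in [lo, hi] whose normalized
-- suffix occurs in normR (best = -1 if none)
-- fuel = the size of the current interval; each step shrinks the interval, so
-- the loop never runs out of fuel before lo > hi
def fao_bsearch (normC normR : List Char) : Nat → Int → Int → Int → Int
  | 0, _, _, best => best
  | fuel + 1, lo, hi, best =>
    if lo ≤ hi then
      let mid := PySem.Int.floordiv (lo + hi) 2
      if PySem.Chars.isIn (PySem.List.slice normC (some (-mid)) none) normR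
      then fao_bsearch normC normR fuel (mid + 1) hi mid
      else fao_bsearch normC normR fuel lo (mid - 1) best
    else best

def find_after_overlap_alt (committed : String) (raw : String) (min_match : Int) : String :=
  if committed = "" ∨ raw = "" then raw
  else
    let pairs := (PySem.List.enumerate raw.toList).filter (fun p => !fao_stripSet.contains p.2)
    let rawPositions := pairs.map (fun p => p.1)
    let normRaw := pairs.map (fun p => PySem.Chars.lowerChar p.2)
    let normCommitted := (committed.toList.filter (fun c => !fao_stripSet.contains c)).map PySem.Chars.lowerChar
    let best := fao_bsearch normCommitted normRaw
      ((min 60 (normCommitted.length : Int)) + 1 - min_match).toNat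
      min_match (min 60 (normCommitted.length : Int)) (-1)
    if best < 0 then raw
    else
      let tail := PySem.List.slice normCommitted (some (-best)) none
      let idx := PySem.Chars.find normRaw tail
      let normEnd := idx + best
      if (rawPositions.length : Int) ≤ normEnd then ""
      else fao_lstrip (PySem.Str.slice raw (some (PySem.List.pyGetD rawPositions normEnd 0)) none)

-- ===== PRECONDITION & SPEC =====
-- Pre_ restricts to the function's natural domain: a positive minimum match
-- length. For min_match ≤ 0 (outside the parameter's intended meaning) A's
-- loop reaches tail_len ≤ 0 and goes through s[-0:] and negative-index
-- wraparound (and can raise IndexError); B does the natural thing there.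
def Pre_find_after_overlap (committed : String) (raw : String) (min_match : Int) : Prop :=
  1 ≤ min_match
instance (committed : String) (raw : String) (min_match : Int) : Decidable (Pre_find_after_overlap committed raw min_match) := by unfold Pre_find_after_overlap; infer_instance

def pvWitness_find_after_overlap : String × String × Int := ("hello there friend", "re friend and more", 3)

def Spec_find_after_overlap (committed : String) (raw : String) (min_match : Int) (out : String) : Prop := out = find_after_overlap_alt committed raw min_match
instance (committed : String) (raw : String) (min_match : Int) (out : String) : Decidable (Spec_find_after_overlap committed raw min_match out) := by unfold Spec_find_after_overlap; infer_instance

-- ===== CLAIM (what is proved, stated in full; the proofs are below) =====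
def Claim_equal_find_after_overlap : Prop := ∀ (committed : String) (raw : String) (min_match : Int), Dom_find_after_overlap committed raw min_match → Pre_find_after_overlap committed raw min_match → Spec_find_after_overlap committed raw min_match (find_after_overlap committed raw min_match)

-- ===== LEMMAS AND PROOFS =====

-- the match predicate: the length-t normalized suffix of normC occurs in normR
abbrev fao_P (normC normR : List Char) (t : Int) : Prop :=
  PySem.Chars.isIn (PySem.List.slice normC (some (-t)) none) normR = true

theorem fao_P_iff_infix (normC normR : List Char) (t : Int) :
    fao_P normC normR t ↔ PySem.List.slice normC (some (-t)) none <:+: normR :=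
  PySem.Chars.isIn_iff_infix _ _

-- reference function: the greatest t in [lo, hi] with fao_P, else -1 (descending scan)
def fao_gmatch (normC normR : List Char) (lo hi : Int) : Int :=
  if _h : lo ≤ hi then
    if fao_P normC normR hi then hi else fao_gmatch normC normR lo (hi - 1)
  else -1
termination_by (hi + 1 - lo).toNat
decreasing_by omega

theorem fao_gmatch_nil {normC normR : List Char} {lo hi : Int} (h : hi < lo) :
    fao_gmatch normC normR lo hi = -1 := by
  unfold fao_gmatch; rw [dif_neg (by omega)]

theorem fao_gmatch_pos {normC normR : List Char} {lo hi : Int} (h : lo ≤ hi)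
    (hP : fao_P normC normR hi) : fao_gmatch normC normR lo hi = hi := by
  unfold fao_gmatch; rw [dif_pos h, if_pos hP]

theorem fao_gmatch_neg {normC normR : List Char} {lo hi : Int} (h : lo ≤ hi)
    (hP : ¬ fao_P normC normR hi) :
    fao_gmatch normC normR lo hi = fao_gmatch normC normR lo (hi - 1) := by
  conv_lhs => rw [fao_gmatch]
  rw [dif_pos h, if_neg hP]

-- extend the scan upward past lengths that do not match
theorem fao_gmatch_congr_above {normC normR : List Char} {lo h h' : Int}
    (hle : h ≤ h') (hfail : ∀ t, h < t → t ≤ h' → ¬ fao_P normC normR t) :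
    fao_gmatch normC normR lo h' = fao_gmatch normC normR lo h := by
  obtain ⟨n, hn⟩ : ∃ n : Nat, h' = h + n := ⟨(h' - h).toNat, by omega⟩
  subst hn
  induction n with
  | zero => simp
  | succ k ih =>
      have hk : (h + (k + 1 : Nat)) = (h + k) + 1 := by push_cast; ring
      by_cases hlo : lo ≤ h + (k + 1 : Nat)
      · rw [fao_gmatch_neg hlo (hfail _ (by push_cast; omega) (by omega)), hk]
        simp only [add_sub_cancel_right]
        exact ih (by omega) (fun t h1 h2 => hfail t h1 (by push_cast at h2 ⊢; omega))
      · rw [fao_gmatch_nil (by omega)]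
        rw [fao_gmatch_nil (by omega)]

-- monotonicity: a shorter (positive-length) suffix is a suffix of a longer
-- one, hence also an infix of normR
theorem fao_P_mono {normC normR : List Char} {t t' : Int}
    (h1 : 1 ≤ t') (h2 : t' ≤ t) (hP : fao_P normC normR t) : fao_P normC normR t' := by
  rw [fao_P_iff_infix] at hP ⊢
  have e1 : PySem.List.slice normC (some (-t)) none = List.drop (normC.length - t.toNat) normC := by
    have := PySem.List.slice_from_neg_natCast normC t.toNat (by omega)
    rwa [show ((t.toNat : Int)) = t by omega] at this
  have e2 : PySem.List.slice normC (some (-t')) none = List.drop (normC.length - t'.toNat) normC := by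
    have := PySem.List.slice_from_neg_natCast normC t'.toNat (by omega)
    rwa [show ((t'.toNat : Int)) = t' by omega] at this
  rw [e1] at hP; rw [e2]
  have hsub : List.drop (normC.length - t'.toNat) normC <:+
      List.drop (normC.length - t.toNat) normC := by
    have : (normC.length - t.toNat) + ((normC.length - t'.toNat) - (normC.length - t.toNat))
        = normC.length - t'.toNat := by omega
    rw [← this, ← List.drop_drop]
    exact List.drop_suffix _ _
  exact hsub.isInfix.trans hP

-- A's scan over range(hi, lo-1, -1) computes the same thing as the reference
theorem fao_loopA_eq_gmatch (normC normR : List Char) (rawPos : List Int) (raw : String)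
    (lo : Int) (hlo : 1 ≤ lo) :
    ∀ hi, fao_loopA normC normR rawPos raw (PySem.List.pyRange hi (lo - 1) (-1)) =
      (if fao_gmatch normC normR lo hi < 0 then raw
       else
        let tail := PySem.List.slice normC (some (-(fao_gmatch normC normR lo hi))) none
        let idx := PySem.Chars.find normR tail
        let normEnd := idx + fao_gmatch normC normR lo hi
        if (rawPos.length : Int) ≤ normEnd then ""
        else fao_lstrip (PySem.Str.slice raw (some (PySem.List.pyGetD rawPos normEnd 0)) none)) := by
  intro hi
  by_cases h : hi < lo
  · rw [PySem.List.pyRange_neg_one_eq_nil (by omega), fao_gmatch_nil h]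
    simp [fao_loopA]
  · push_neg at h
    obtain ⟨n, hn⟩ : ∃ n : Nat, hi = lo + n := ⟨(hi - lo).toNat, by omega⟩
    subst hn
    induction n with
    | zero =>
        simp only [Nat.cast_zero, add_zero] at *
        rw [PySem.List.pyRange_neg_one_cons (by omega),
            PySem.List.pyRange_neg_one_eq_nil (by omega)]
        by_cases hP : fao_P normC normR lo
        · have hfind : 0 ≤ PySem.Chars.find normR (PySem.List.slice normC (some (-lo)) none) :=
            (PySem.Chars.find_nonneg_iff _ _).mpr ((fao_P_iff_infix _ _ _).mp hP)
          rw [fao_gmatch_pos le_rfl hP]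
          simp only [fao_loopA, if_pos hfind, if_neg (by omega : ¬ lo < 0)]
        · have hfind : ¬ 0 ≤ PySem.Chars.find normR (PySem.List.slice normC (some (-lo)) none) := by
            intro hc; exact hP ((fao_P_iff_infix _ _ _).mpr ((PySem.Chars.find_nonneg_iff _ _).mp hc))
          rw [fao_gmatch_neg le_rfl hP, fao_gmatch_nil (by omega)]
          simp only [fao_loopA, if_neg hfind, if_pos (by omega : (-1 : Int) < 0)]
    | succ k ih =>
        have hhi : lo ≤ lo + ((k + 1 : Nat) : Int) := by push_cast; omega
        rw [PySem.List.pyRange_neg_one_cons (by omega)]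
        by_cases hP : fao_P normC normR (lo + ((k + 1 : Nat) : Int))
        · have hfind : 0 ≤ PySem.Chars.find normR
              (PySem.List.slice normC (some (-(lo + ((k + 1 : Nat) : Int)))) none) :=
            (PySem.Chars.find_nonneg_iff _ _).mpr ((fao_P_iff_infix _ _ _).mp hP)
          rw [fao_gmatch_pos hhi hP]
          simp only [fao_loopA, if_pos hfind, if_neg (by push_cast; omega : ¬ lo + ((k + 1 : Nat) : Int) < 0)]
        · have hfind : ¬ 0 ≤ PySem.Chars.find normR
              (PySem.List.slice normC (some (-(lo + ((k + 1 : Nat) : Int)))) none) := by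
            intro hc; exact hP ((fao_P_iff_infix _ _ _).mpr ((PySem.Chars.find_nonneg_iff _ _).mp hc))
          have hk : lo + ((k + 1 : Nat) : Int) - 1 = lo + (k : Nat) := by push_cast; ring
          rw [fao_gmatch_neg hhi hP, hk]
          simp only [fao_loopA, if_neg hfind]
          exact ih (by omega)

-- the binary search computes the greatest matching length in [lo0, hi0]
theorem fao_bsearch_eq_gmatch (normC normR : List Char) (lo0 hi0 : Int) (hlo0 : 1 ≤ lo0) :
    ∀ (n : Nat) (lo hi best : Int), (hi + 1 - lo).toNat ≤ n → lo0 ≤ lo → lo - 1 ≤ hi0 →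
      (∀ t, hi < t → t ≤ hi0 → ¬ fao_P normC normR t) →
      best = fao_gmatch normC normR lo0 (lo - 1) →
      hi ≤ hi0 →
      fao_bsearch normC normR n lo hi best = fao_gmatch normC normR lo0 hi0 := by
  intro n
  induction n with
  | zero =>
      intro lo hi best hn hlo hwin hfail hbest hhi
      have hlt : hi < lo := by omega
      rw [show fao_bsearch normC normR 0 lo hi best = best from rfl]
      rw [hbest, fao_gmatch_congr_above (by omega : (lo - 1) ≤ hi0)
        (fun t h1 h2 => hfail t (by omega) h2)]
  | succ m ih =>
      intro lo hi best hn hlo hwin hfail hbest hhi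
      by_cases h : lo ≤ hi
      · rw [fao_bsearch, if_pos h]
        have hmid := PySem.Int.floordiv_two_mid_bounds h
        set mid := PySem.Int.floordiv (lo + hi) 2 with hmiddef
        by_cases hP : fao_P normC normR mid
        · rw [if_pos hP]
          refine ih (mid + 1) hi mid (by omega) (by omega) (by omega) hfail ?_ hhi
          simp only [add_sub_cancel_right]
          exact (fao_gmatch_pos (by omega) hP).symm
        · rw [if_neg hP]
          refine ih lo (mid - 1) best (by omega) hlo hwin ?_ hbest (by omega)
          intro t h1 h2
          by_cases ht : hi < t
          · exact hfail t ht h2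
          · intro hPt
            exact hP (fao_P_mono (by omega) (by omega) hPt)
      · rw [fao_bsearch, if_neg h]
        rw [hbest, fao_gmatch_congr_above (by omega : (lo - 1) ≤ hi0)
          (fun t h1 h2 => hfail t (by omega) h2)]

-- A's normalization pair-loop equals B's filter/map normalization
theorem fao_norm_eq (l : List (Int × Char)) :
    l.foldl
      (fun (acc : List Char × List Int) p =>
        if fao_stripSet.contains p.2 then acc
        else (acc.1 ++ [PySem.Chars.lowerChar p.2], acc.2 ++ [p.1]))
      ([], []) =
    ((l.filter (fun p => !fao_stripSet.contains p.2)).map (fun p => PySem.Chars.lowerChar p.2),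
     (l.filter (fun p => !fao_stripSet.contains p.2)).map (fun p => p.1)) := by
  have hfe : (fun (acc : List Char × List Int) (p : Int × Char) =>
        if fao_stripSet.contains p.2 then acc
        else (acc.1 ++ [PySem.Chars.lowerChar p.2], acc.2 ++ [p.1])) =
      (fun (acc : List Char × List Int) (p : Int × Char) =>
        ((if !fao_stripSet.contains p.2 then acc.1 ++ [PySem.Chars.lowerChar p.2] else acc.1),
         (if !fao_stripSet.contains p.2 then acc.2 ++ [p.1] else acc.2))) := by
    funext acc p
    by_cases hc : p.2 ∈ fao_stripSet <;> simp [hc]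
  rw [hfe,
    PySem.List.foldl_prod_mk
      (f := fun (a : List Char) (p : Int × Char) =>
        if !fao_stripSet.contains p.2 then a ++ [PySem.Chars.lowerChar p.2] else a)
      (g := fun (a : List Int) (p : Int × Char) =>
        if !fao_stripSet.contains p.2 then a ++ [p.1] else a),
    PySem.List.foldl_append_if _ _, PySem.List.foldl_append_if _ _]
  simp

-- ===== VERDICT (by name: the statement is the Claim_ definition above) =====
theorem find_after_overlap_spec : Claim_equal_find_after_overlap := by
  intro committed raw min_match _hdom hpre
  unfold Spec_find_after_overlap find_after_overlap find_after_overlap_alt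
  by_cases hempty : committed = "" ∨ raw = ""
  · rw [if_pos hempty, if_pos hempty]
  · rw [if_neg hempty, if_neg hempty]
    rw [fao_norm_eq]
    set fl := (PySem.List.enumerate raw.toList).filter (fun p => !fao_stripSet.contains p.2) with hfl
    set normR := fl.map (fun p => PySem.Chars.lowerChar p.2) with hnormR
    set rawPos := fl.map (fun p => p.1) with hrawPos
    set normC := (committed.toList.filter (fun c => !fao_stripSet.contains c)).map PySem.Chars.lowerChar with hnormC
    have hpre1 : (1 : Int) ≤ min_match := hpre
    have hb : fao_bsearch normC normR
        ((min 60 (normC.length : Int)) + 1 - min_match).toNat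
        min_match (min 60 (normC.length : Int)) (-1) =
        fao_gmatch normC normR min_match (min 60 (normC.length : Int)) := by
      by_cases hw : min_match - 1 ≤ min 60 (normC.length : Int)
      · exact fao_bsearch_eq_gmatch normC normR min_match (min 60 (normC.length : Int)) hpre1
          ((min 60 (normC.length : Int)) + 1 - min_match).toNat
          min_match (min 60 (normC.length : Int)) (-1) le_rfl le_rfl hw
          (fun t h1 h2 => absurd h1 (by omega))
          (by rw [fao_gmatch_nil (by omega)]) le_rfl
      · rw [fao_gmatch_nil (by omega)]
        rw [show ((min 60 (normC.length : Int)) + 1 - min_match).toNat = 0 by omega]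
        rfl
    have hl := fao_loopA_eq_gmatch normC normR rawPos raw min_match hpre1
      (min 60 (normC.length : Int))
    rw [hl]
    simp only [← hnormR, ← hrawPos, hb]
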